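-- pv_equiv track=rewrite | github.com/AVUKU-PRAGATHESWARI/LeetCode | 2562. Find the Array Concatenation Value.py | findTheArrayConcVal
-- ===== SOURCE A (Python) =====
-- from typing import List
--
-- def findTheArrayConcVal(nums: List[int]) -> int:
--     result = 0
--     while(nums):
--         if len(nums)<=1:
--             result += nums[0]
--             break
--         curr = int(str(nums[0])+str(nums[-1]))
--         result += int(curr)
--         del nums[0]
--         del nums[-1]
--     return result
-- ===== SOURCE B (Python) =====
-- def findTheArrayConcVal(nums):
--     total = 0
--     i, j = 0, len(nums) - 1
--     while i < j:
--         total += int(str(nums[i]) + str(nums[j]))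
--         i += 1
--         j -= 1
--     if i == j:
--         total += nums[i]
--     return total
-- ===== Notes on version B (the rewrite author's own statement) =====
-- stated objective: faster
-- what changed: Replaced the destructive loop that repeatedly deletes the first and last element (each O(n) list shifts) with a two-pointer scan from both ends over the untouched list.
import Mathlib
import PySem

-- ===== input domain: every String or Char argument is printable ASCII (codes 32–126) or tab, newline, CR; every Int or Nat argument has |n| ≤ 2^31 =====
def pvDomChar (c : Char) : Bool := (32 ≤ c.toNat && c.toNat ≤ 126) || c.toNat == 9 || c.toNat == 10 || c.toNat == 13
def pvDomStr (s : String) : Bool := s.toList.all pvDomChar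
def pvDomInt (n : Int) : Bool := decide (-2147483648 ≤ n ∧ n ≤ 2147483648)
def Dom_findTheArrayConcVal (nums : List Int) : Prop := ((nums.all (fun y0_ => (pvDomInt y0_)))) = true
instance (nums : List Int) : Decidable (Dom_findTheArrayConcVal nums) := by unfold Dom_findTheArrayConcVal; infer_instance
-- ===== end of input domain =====

-- B replaces A's destructive delete-both-ends loop with a two-pointer scan (O(n) vs O(n^2)).
-- A mutates its argument (del nums[0]/del nums[-1]); B does not — the equivalence proved is about the return value only.

-- ===== PORT A =====
-- int(str(x) + str(y)); .getD 0 is never reached under Pre_ (Python raises ValueError exactly there)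
def pvConcat (x y : Int) : Int :=
  (PySem.Int.ofStr? (PySem.Int.toStr x ++ PySem.Int.toStr y)).getD 0

def findTheArrayConcValGo (nums : List Int) (result : Int) : Int :=
  match nums with
  | [] => result
  | [x] => result + x
  | x :: y :: rest =>
      findTheArrayConcValGo (y :: rest).dropLast
        (result + pvConcat x ((y :: rest).getLast (by simp)))
termination_by nums.length
decreasing_by simp

def findTheArrayConcVal (nums : List Int) : Int :=
  findTheArrayConcValGo nums 0

-- ===== PORT B =====
def findTheArrayConcValAltLoop (nums : List Int) (i j total : Int) : Int :=
  if i < j then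
    findTheArrayConcValAltLoop nums (i + 1) (j - 1)
      (total + pvConcat ((PySem.List.pyGet? nums i).getD 0) ((PySem.List.pyGet? nums j).getD 0))
  else if i = j then total + (PySem.List.pyGet? nums i).getD 0
  else total
termination_by (j - i).toNat
decreasing_by omega

def findTheArrayConcVal_alt (nums : List Int) : Int :=
  findTheArrayConcValAltLoop nums 0 ((nums.length : Int) - 1) 0

-- ===== PRECONDITION & SPEC =====
-- Pre_ excludes exactly the inputs where Python A raises ValueError: a negative number in the
-- right half (the right element of some inward pair), where int(str(left)+str(right)) sees '-' mid-string.
def Pre_findTheArrayConcVal (nums : List Int) : Prop :=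
  ∀ x ∈ nums.drop (nums.length - nums.length / 2), 0 ≤ x
instance (nums : List Int) : Decidable (Pre_findTheArrayConcVal nums) := by
  unfold Pre_findTheArrayConcVal; infer_instance

def pvWitness_findTheArrayConcVal : List Int := [7, -1, 13, 4, 5]

def Spec_findTheArrayConcVal (nums : List Int) (out : Int) : Prop := out = findTheArrayConcVal_alt nums
instance (nums : List Int) (out : Int) : Decidable (Spec_findTheArrayConcVal nums out) := by unfold Spec_findTheArrayConcVal; infer_instance

-- ===== CLAIM (what is proved, stated in full; the proofs are below) =====
def Claim_equal_findTheArrayConcVal : Prop := ∀ (nums : List Int), Dom_findTheArrayConcVal nums → Pre_findTheArrayConcVal nums → Spec_findTheArrayConcVal nums (findTheArrayConcVal nums)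

-- ===== LEMMAS AND PROOFS =====

lemma go_step (x : Int) (ys : List Int) (z : Int) (total : Int) :
    findTheArrayConcValGo (x :: (ys ++ [z])) total
      = findTheArrayConcValGo ys (total + pvConcat x z) := by
  cases ys with
  | nil => simp [findTheArrayConcValGo]
  | cons w ws =>
      rw [show (x :: ((w :: ws) ++ [z])) = x :: w :: (ws ++ [z]) by simp]
      rw [findTheArrayConcValGo.eq_def]
      have h1 : (w :: (ws ++ [z])).dropLast = w :: ws := by
        rw [show (w :: (ws ++ [z])) = (w :: ws) ++ [z] from rfl, List.dropLast_concat]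
      have h2 : (w :: (ws ++ [z])).getLast (by simp) = z := by
        simp [List.getLast_eq_getElem]
      simp only [h1, h2]

lemma loop_eq (nums : List Int) (b : Nat) :
    ∀ (a : Nat) (total : Int), a + b ≤ nums.length →
      findTheArrayConcValGo ((nums.drop a).take b) total
        = findTheArrayConcValAltLoop nums (a : Int) ((a : Int) + (b : Int) - 1) total := by
  induction b using Nat.strong_induction_on with
  | _ b ih =>
    intro a total hab
    match b with
    | 0 =>
        rw [findTheArrayConcValAltLoop]
        rw [if_neg (show ¬((a:Int) < (a:Int) + (0:Nat) - 1) by push_cast; omega),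
            if_neg (show ¬((a:Int) = (a:Int) + (0:Nat) - 1) by push_cast; omega)]
        simp [findTheArrayConcValGo]
    | 1 =>
        have ha : a < nums.length := by omega
        have : (nums.drop a).take 1 = [nums[a]] := by
          simp [List.take_one, List.head?_drop, List.getElem?_eq_getElem ha]
        rw [this, findTheArrayConcValAltLoop]
        have h1 : ¬ ((a : Int) < (a : Int) + (1 : Int) - 1) := by omega
        have h2 : ((a : Int) + (1 : Int) - 1) = (a : Int) := by omega
        simp [findTheArrayConcValGo, h2, PySem.List.pyGet?_natCast, List.getElem?_eq_getElem ha]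
    | (b + 2) =>
        have ha : a < nums.length := by omega
        have hz : a + 1 + b < nums.length := by omega
        have hseg : (nums.drop a).take (b + 2)
            = nums[a] :: ((nums.drop (a+1)).take b ++ [nums[a+1+b]]) := by
          rw [List.drop_eq_getElem_cons ha, List.take_succ_cons,
              List.take_add_one, List.getElem?_drop, List.getElem?_eq_getElem hz]
          rfl
        rw [hseg, go_step, findTheArrayConcValAltLoop]
        have hlt : (a : Int) < (a : Int) + ((b : Nat) + 2 : Nat) - 1 := by push_cast; omega
        rw [if_pos hlt]
        have e1 : (PySem.List.pyGet? nums (a : Int)).getD 0 = nums[a] := by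
          simp [PySem.List.pyGet?_natCast, List.getElem?_eq_getElem ha]
        have e2 : (PySem.List.pyGet? nums (((a + 1 + b : Nat)) : Int)).getD 0
            = nums[a+1+b] := by
          rw [PySem.List.pyGet?_natCast, List.getElem?_eq_getElem hz]
          rfl
        rw [e1, show ((a : Int) + (((b : Nat) + 2 : Nat) : Int) - 1) = ((a + 1 + b : Nat) : Int) by push_cast; omega, e2]
        have := ih b (by omega) (a + 1) (total + pvConcat nums[a] nums[a+1+b]) (by omega)
        rw [this]
        congr 1

-- ===== VERDICT (by name: the statement is the Claim_ definition above) =====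
theorem findTheArrayConcVal_spec : Claim_equal_findTheArrayConcVal := by
  intro nums _ _
  unfold Spec_findTheArrayConcVal findTheArrayConcVal findTheArrayConcVal_alt
  have := loop_eq nums nums.length 0 0 (by omega)
  simpa using this
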